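-- pv_equiv track=rewrite | github.com/DapperOberon/dapperoberon.github.io | star-wars-timeline/scripts/uid_manifest.py | encode_base36
-- ===== SOURCE A (Python) =====
-- ALPHABET = "0123456789abcdefghijklmnopqrstuvwxyz"
--
-- UID_LENGTH = 3
--
-- def encode_base36(number: int, length: int = UID_LENGTH) -> str:
--     if number < 0:
--         raise ValueError("UID number must be non-negative")
--     if number == 0:
--         encoded = "0"
--     else:
--         encoded_chars = []
--         current = number
--         while current > 0:
--             current, remainder = divmod(current, len(ALPHABET))
--             encoded_chars.append(ALPHABET[remainder])
--         encoded = "".join(reversed(encoded_chars))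
--     return encoded.rjust(length, "0")
-- ===== SOURCE B (Python) =====
-- ALPHABET = "0123456789abcdefghijklmnopqrstuvwxyz"
--
-- UID_LENGTH = 3
--
-- def encode_base36(number: int, length: int = UID_LENGTH) -> str:
--     if number < 0:
--         raise ValueError("UID number must be non-negative")
--     ndigits = 1
--     while 36 ** ndigits <= number:
--         ndigits += 1
--     width = max(length, ndigits)
--     digits = "".join(ALPHABET[(number // 36 ** (ndigits - 1 - i)) % 36] for i in range(ndigits))
--     return "0" * (width - ndigits) + digits
-- ===== Notes on version B (the rewrite author's own statement) =====
-- stated objective: alternative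
-- what changed: Instead of accumulating divmod remainders least-significant-first, reversing, and calling rjust, B first computes the digit count with a power-of-36 loop, then emits the digits most-significant-first positionally via (number // 36**(ndigits-1-i)) % 36 and prepends the zero padding by string multiplication.
import Mathlib
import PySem

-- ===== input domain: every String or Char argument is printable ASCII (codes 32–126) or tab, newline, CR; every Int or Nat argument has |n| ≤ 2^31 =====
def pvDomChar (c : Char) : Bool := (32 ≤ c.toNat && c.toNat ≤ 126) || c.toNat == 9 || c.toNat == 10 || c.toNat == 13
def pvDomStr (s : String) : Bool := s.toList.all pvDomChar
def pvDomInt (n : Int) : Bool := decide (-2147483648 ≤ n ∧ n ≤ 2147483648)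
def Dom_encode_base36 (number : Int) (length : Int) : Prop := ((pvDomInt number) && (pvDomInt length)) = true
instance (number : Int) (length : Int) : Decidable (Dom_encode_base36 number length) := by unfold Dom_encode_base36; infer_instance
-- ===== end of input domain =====

-- B replaces A's divmod-accumulate-then-reverse-then-rjust pipeline by computing the digit count
-- first and then extracting every output character positionally with powers of 36 in one pass
-- (padding folded into the same pass); objective: alternative.

def pvAlphabet : List Char := "0123456789abcdefghijklmnopqrstuvwxyz".toList

-- ===== PORT A =====
-- while current > 0: current, remainder = divmod(current, 36); encoded_chars.append(ALPHABET[remainder])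
-- (Pre_ guarantees number ≥ 0, so the loop state is carried as a Nat; divmod with positive operands is Nat / and %)
def pvALoop (current : Nat) (acc : List Char) : List Char :=
  if 0 < current then
    pvALoop (current / 36) (acc ++ [pvAlphabet.getD (current % 36) '0'])
  else acc
termination_by current
decreasing_by exact Nat.div_lt_self (by omega) (by omega)

-- str.rjust(length, "0") ported by hand: pad on the left up to `length` (exact: Int.toNat clamps the
-- pad count at 0 exactly as Python pads nothing when length ≤ len(encoded))
def encode_base36 (number : Int) (length : Int) : String :=
  let encoded : List Char :=
    if number = 0 then ['0'] else (pvALoop number.toNat []).reverse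
  String.ofList (List.replicate (length - encoded.length).toNat '0' ++ encoded)

-- ===== PORT B =====
-- ndigits = 1; while 36 ** ndigits <= number: ndigits += 1
def pvNd (n : Nat) (d : Nat) : Nat :=
  if 36 ^ d ≤ n then pvNd n (d + 1) else d
termination_by n - d
decreasing_by
  have hd : d < 36 ^ d := Nat.lt_pow_self (by omega)
  omega

-- digits = "".join(ALPHABET[(number // 36 ** (ndigits - 1 - i)) % 36] for i in range(ndigits))
-- return "0" * (width - ndigits) + digits, with width = max(length, ndigits)
def encode_base36_alt (number : Int) (length : Int) : String :=
  let n := number.toNat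
  let nd := pvNd n 1
  let width := (max length (nd : Int)).toNat
  let digits := (List.range nd).map (fun i => pvAlphabet.getD ((n / 36 ^ (nd - 1 - i)) % 36) '0')
  String.ofList (List.replicate (width - nd) '0' ++ digits)

-- ===== PRECONDITION & SPEC =====
-- A raises ValueError on negative numbers; Pre_ excludes exactly those.
def Pre_encode_base36 (number : Int) (length : Int) : Prop := 0 ≤ number
instance (number : Int) (length : Int) : Decidable (Pre_encode_base36 number length) := by unfold Pre_encode_base36; infer_instance
def pvWitness_encode_base36 : Int × Int := (37, 3)

def Spec_encode_base36 (number : Int) (length : Int) (out : String) : Prop := out = encode_base36_alt number length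
instance (number : Int) (length : Int) (out : String) : Decidable (Spec_encode_base36 number length out) := by unfold Spec_encode_base36; infer_instance

-- ===== CLAIM =====
def Claim_equal_encode_base36 : Prop := ∀ (number : Int) (length : Int), Dom_encode_base36 number length → Pre_encode_base36 number length → Spec_encode_base36 number length (encode_base36 number length)

-- ===== LEMMAS AND PROOFS =====

-- canonical digit string (most-significant first), used only by the proofs
def pvBRec (n : Nat) : List Char :=
  if n = 0 then [] else pvBRec (n / 36) ++ [pvAlphabet.getD (n % 36) '0']
termination_by n
decreasing_by exact Nat.div_lt_self (by omega) (by omega)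

theorem pvBRec_zero : pvBRec 0 = [] := by rw [pvBRec]; simp

theorem pvALoop_eq (c : Nat) (acc : List Char) : pvALoop c acc = acc ++ (pvBRec c).reverse := by
  induction c using Nat.strong_induction_on generalizing acc with
  | _ c ih =>
    rw [pvALoop, pvBRec]
    by_cases h : 0 < c
    · have hne : ¬ c = 0 := by omega
      rw [if_pos h, if_neg hne, ih (c / 36) (Nat.div_lt_self h (by omega))]
      simp
    · have : c = 0 := by omega
      simp [this]

theorem pvBRec_ne_nil (c : Nat) (h : 0 < c) : pvBRec c ≠ [] := by
  rw [pvBRec, if_neg (by omega : ¬ c = 0)]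
  simp

-- length of A's digit string, with 0 ↦ 1 (the length of "0")
def pvLen (n : Nat) : Nat := if n = 0 then 1 else (pvBRec n).length

theorem pvLen_pos (n : Nat) : 0 < pvLen n := by
  unfold pvLen
  by_cases h : n = 0
  · simp [h]
  · have := pvBRec_ne_nil n (by omega)
    simp [h, List.length_pos_iff]
    exact this

theorem pvLen_lt (n : Nat) : n < 36 ^ pvLen n := by
  induction n using Nat.strong_induction_on with
  | _ n ih =>
    by_cases h : n = 0
    · simp [h, pvLen]
    · have hrec : pvBRec n = pvBRec (n / 36) ++ [pvAlphabet.getD (n % 36) '0'] := by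
        rw [pvBRec, if_neg h]
      by_cases h36 : n / 36 = 0
      · have hlen : pvLen n = 1 := by
          unfold pvLen; rw [if_neg h, hrec, h36, pvBRec_zero]; simp
        rw [hlen]; omega
      · have ih' := ih (n / 36) (Nat.div_lt_self (by omega) (by omega))
        have hlen : pvLen n = pvLen (n / 36) + 1 := by
          unfold pvLen; rw [if_neg h, if_neg h36, hrec]; simp
        rw [hlen, pow_succ]
        calc n < 36 * (n / 36) + 36 := by omega
          _ = 36 * (n / 36 + 1) := by ring
          _ ≤ 36 * 36 ^ pvLen (n / 36) := by
              have : n / 36 + 1 ≤ 36 ^ pvLen (n / 36) := by omega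
              exact Nat.mul_le_mul_left 36 this
          _ = 36 ^ pvLen (n / 36) * 36 := by ring

theorem pvLen_ge (n : Nat) (h : 0 < n) : 36 ^ (pvLen n - 1) ≤ n := by
  induction n using Nat.strong_induction_on with
  | _ n ih =>
    have hne : ¬ n = 0 := by omega
    have hrec : pvBRec n = pvBRec (n / 36) ++ [pvAlphabet.getD (n % 36) '0'] := by
      rw [pvBRec, if_neg hne]
    by_cases h36 : n / 36 = 0
    · have hlen : pvLen n = 1 := by
        unfold pvLen; rw [if_neg hne, hrec, h36, pvBRec_zero]; simp
      rw [hlen]; simpa using h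
    · have ih' := ih (n / 36) (Nat.div_lt_self (by omega) (by omega)) (by omega)
      have hlen : pvLen n = pvLen (n / 36) + 1 := by
        unfold pvLen; rw [if_neg hne, if_neg h36, hrec]; simp
      have hp := pvLen_pos (n / 36)
      rw [hlen]
      have he : 36 ^ (pvLen (n / 36) + 1 - 1) = 36 ^ (pvLen (n / 36) - 1 + 1) := by
        congr 1; omega
      rw [he, pow_succ]
      calc 36 ^ (pvLen (n / 36) - 1) * 36 ≤ (n / 36) * 36 := Nat.mul_le_mul_right 36 ih'
        _ ≤ n := by omega

theorem pvNd_eq_aux (k : Nat) : ∀ (n d : Nat), pvLen n - d = k → 1 ≤ d → d ≤ pvLen n → pvNd n d = pvLen n := by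
  induction k with
  | zero =>
    intro n d hk _ hd
    have hde : d = pvLen n := by omega
    rw [pvNd, if_neg]
    · exact hde
    · rw [hde]; exact Nat.not_le_of_lt (pvLen_lt n)
  | succ k ih =>
    intro n d hk h1 hd
    have hdlt : d < pvLen n := by omega
    have hn0 : 0 < n := by
      by_contra hc
      have : n = 0 := by omega
      rw [this] at hdlt
      simp [pvLen] at hdlt
      omega
    have hcond : 36 ^ d ≤ n := by
      have h2 : 36 ^ d ≤ 36 ^ (pvLen n - 1) :=
        Nat.pow_le_pow_right (by omega) (by omega)
      exact le_trans h2 (pvLen_ge n hn0)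
    rw [pvNd, if_pos hcond]
    exact ih n (d + 1) (by omega) (by omega) (by omega)

theorem pvNd_eq (n : Nat) : pvNd n 1 = pvLen n :=
  pvNd_eq_aux (pvLen n - 1) n 1 rfl le_rfl (pvLen_pos n)

-- positional extraction over any width w equals left-zero-padded pvBRec (given n < 36^w)
theorem range_map_eq (w : Nat) : ∀ (n : Nat), n < 36 ^ w →
    (List.range w).map (fun i => pvAlphabet.getD ((n / 36 ^ (w - 1 - i)) % 36) '0')
      = List.replicate (w - (pvBRec n).length) '0' ++ pvBRec n := by
  induction w with
  | zero =>
    intro n hn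
    interval_cases n
    simp [pvBRec_zero]
  | succ w ih =>
    intro n hn
    rw [List.range_succ, List.map_append]
    have htail : (List.range w).map (fun i => pvAlphabet.getD ((n / 36 ^ (w + 1 - 1 - i)) % 36) '0')
        = (List.range w).map (fun i => pvAlphabet.getD (((n / 36) / 36 ^ (w - 1 - i)) % 36) '0') := by
      apply List.map_congr_left
      intro i hi
      have hi' : i < w := List.mem_range.mp hi
      have he : w + 1 - 1 - i = (w - 1 - i) + 1 := by omega
      rw [he, pow_succ, Nat.mul_comm, ← Nat.div_div_eq_div_mul]
    have hdiv : n / 36 < 36 ^ w := by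
      rw [Nat.div_lt_iff_lt_mul (by omega)]
      calc n < 36 ^ (w + 1) := hn
        _ = 36 ^ w * 36 := by rw [pow_succ]
    have hlast : w + 1 - 1 - w = 0 := by omega
    rw [htail, ih (n / 36) hdiv]
    simp only [List.map_cons, List.map_nil, hlast, pow_zero, Nat.div_one]
    by_cases h : n = 0
    · subst h
      have hd : pvAlphabet.getD (0 % 36) '0' = '0' := by decide
      simp only [pvBRec_zero, Nat.zero_div, List.length_nil, Nat.sub_zero, List.append_nil, hd]
      rw [List.replicate_succ']
    · have hrec : pvBRec n = pvBRec (n / 36) ++ [pvAlphabet.getD (n % 36) '0'] := by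
        rw [pvBRec, if_neg h]
      rw [hrec]
      simp only [List.length_append, List.length_cons, List.length_nil]
      have : w + 1 - ((pvBRec (n / 36)).length + (0 + 1)) = w - (pvBRec (n / 36)).length := by omega
      rw [this]
      simp

-- B's positional pass, for any admissible width, in terms of the padded canonical digits
theorem B_core (n w : Nat) (hw : pvLen n ≤ w) :
    (List.range w).map (fun i => pvAlphabet.getD ((n / 36 ^ (w - 1 - i)) % 36) '0')
      = List.replicate (w - pvLen n) '0' ++ (if n = 0 then ['0'] else pvBRec n) := by
  have hnw : n < 36 ^ w := lt_of_lt_of_le (pvLen_lt n) (Nat.pow_le_pow_right (by omega) hw)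
  rw [range_map_eq w n hnw]
  by_cases h : n = 0
  · subst h
    have h1 : 0 < w := lt_of_lt_of_le (pvLen_pos 0) hw
    rw [pvBRec_zero]
    simp only [pvLen, List.length_nil, Nat.sub_zero, List.append_nil, reduceIte]
    rw [← List.replicate_succ']
    congr 1
    omega
  · rw [if_neg h]
    have hL : pvLen n = (pvBRec n).length := by unfold pvLen; rw [if_neg h]
    rw [hL]

-- A's result in terms of the same padded canonical digits
theorem A_core (number length : Int) (h : 0 ≤ number) :
    encode_base36 number length
      = String.ofList (List.replicate (length - (pvLen number.toNat : Int)).toNat '0'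
          ++ (if number.toNat = 0 then ['0'] else pvBRec number.toNat)) := by
  unfold encode_base36
  by_cases h0 : number = 0
  · subst h0
    simp [pvLen]
  · have hm : ¬ number.toNat = 0 := by omega
    have hL : pvLen number.toNat = (pvBRec number.toNat).length := by unfold pvLen; rw [if_neg hm]
    simp only [if_neg h0, if_neg hm]
    rw [pvALoop_eq, List.nil_append, List.reverse_reverse, hL]

theorem count_arith (length : Int) (L : Nat) (hL : 0 < L) :
    (max length (L : Int)).toNat - L = (length - (L : Int)).toNat := by
  rcases le_total length ((L : Int)) with hc | hc
  · rw [max_eq_right hc]; omega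
  · rw [max_eq_left hc]; omega


-- ===== VERDICT =====
theorem encode_base36_spec : Claim_equal_encode_base36 := by
  unfold Claim_equal_encode_base36
  intro number length _ hpre
  unfold Spec_encode_base36 encode_base36_alt
  simp only [pvNd_eq]
  rw [B_core number.toNat (pvLen number.toNat) le_rfl]
  simp only [Nat.sub_self, List.replicate_zero, List.nil_append]
  rw [A_core number length hpre, count_arith length _ (pvLen_pos _)]
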